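-- pv_equiv track=rewrite | github.com/amiruzzaman/amiruzzaman.github.io | coins/fix_missing_image_and_box_values_coins.py | process_coin_data
-- ===== SOURCE A (Python) =====
-- from collections import defaultdict
--
-- def process_coin_data(data):
--     """
--     Process coin data according to the rules:
--     1. For objects with same country, find which have "box" values
--     2. Add "box" key and value to common country objects
--     3. If country has multiple objects and one doesn't have "image", delete that object
--     4. Ensure all objects with same country have same "box" value
--     """
--     # Group data by country
--     country_groups = defaultdict(list)
--
--     # First pass: group by country
--     for item in data:
--         country = item.get('country', 'Unknown')
--         country_groups[country].append(item)
--
--     processed_data = []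
--     stats = {
--         'total_countries': len(country_groups),
--         'total_items_before': len(data),
--         'items_removed': 0,
--         'boxes_added': 0
--     }
--
--     # Process each country group
--     for country, items in country_groups.items():
--         # Find box value for this country (take first non-empty box found)
--         box_value = None
--         for item in items:
--             if item.get('box') and str(item['box']).strip():
--                 box_value = item['box']
--                 break
--
--         # If country has multiple items, check for images
--         if len(items) > 1:
--             # Check if any items have images
--             has_items_with_images = any(
--                 item.get('image') and str(item['image']).strip()
--                 for item in items
--             )
--
--             if has_items_with_images:
--                 # Keep only items with images
--                 items_to_keep = [
--                     item for item in items
--                     if item.get('image') and str(item['image']).strip()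
--                 ]
--                 stats['items_removed'] += (len(items) - len(items_to_keep))
--                 items = items_to_keep
--
--         # Add box value to all items in this country group
--         if box_value:
--             for item in items:
--                 if not item.get('box') or not str(item['box']).strip():
--                     item['box'] = box_value
--                     stats['boxes_added'] += 1
--             # Ensure all items have the same box value
--             for item in items:
--                 item['box'] = box_value
--
--         # Add processed items to result
--         processed_data.extend(items)
--
--     stats['total_items_after'] = len(processed_data)
--     return processed_data, stats
-- ===== SOURCE B (Python) =====
-- def _valid(item, key):
--     v = item.get(key)
--     return bool(v) and bool(str(v).strip())
--
--
-- def process_coin_data(data):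
--     # Repeated stable partition: no grouping dict at all. While items remain,
--     # split off every item sharing the first item's country, process that group
--     # functionally, and continue with the remainder. Group order (first
--     # occurrence of each country) and in-group order match A's grouped output.
--     rest = list(data)
--     processed = []
--     n_countries = 0
--     removed = 0
--     added = 0
--     while rest:
--         c = rest[0].get('country', 'Unknown')
--         group = [it for it in rest if it.get('country', 'Unknown') == c]
--         rest = [it for it in rest if it.get('country', 'Unknown') != c]
--         n_countries += 1
--         if len(group) > 1 and any(_valid(it, 'image') for it in group):
--             kept = [it for it in group if _valid(it, 'image')]
--         else:
--             kept = group
--         removed += len(group) - len(kept)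
--         box = next((it['box'] for it in group if _valid(it, 'box')), None)
--         if box is not None:
--             added += sum(1 for it in kept if not _valid(it, 'box'))
--             for it in kept:
--                 it['box'] = box
--         processed.extend(kept)
--     stats = {
--         'total_countries': n_countries,
--         'total_items_before': len(data),
--         'items_removed': removed,
--         'boxes_added': added,
--         'total_items_after': len(processed),
--     }
--     return processed, stats
-- ===== Notes on version B (the rewrite author's own statement) =====
-- stated objective: alternative
-- what changed: A builds a country->items dict in one pass and then folds over the dict's groups; B uses no grouping structure at all: it repeatedly splits the remaining list into the first item's country-group and the rest (stable partition), processing each group as it is peeled off.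
import Mathlib
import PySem

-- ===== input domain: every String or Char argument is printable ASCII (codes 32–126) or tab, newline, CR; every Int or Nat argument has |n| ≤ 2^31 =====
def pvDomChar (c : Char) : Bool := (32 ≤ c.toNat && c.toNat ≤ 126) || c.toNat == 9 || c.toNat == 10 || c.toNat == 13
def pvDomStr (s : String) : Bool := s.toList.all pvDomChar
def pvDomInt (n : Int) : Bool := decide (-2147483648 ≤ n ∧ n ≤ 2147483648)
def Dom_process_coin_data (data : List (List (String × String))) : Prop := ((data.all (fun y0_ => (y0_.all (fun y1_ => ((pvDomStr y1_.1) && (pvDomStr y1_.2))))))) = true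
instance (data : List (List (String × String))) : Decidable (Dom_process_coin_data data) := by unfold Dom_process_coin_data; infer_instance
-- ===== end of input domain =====

-- B replaces A's dict-based group-by with a repeated stable partition on the list itself
-- (no grouping structure); equivalence is about the RETURN value (both Pythons mutate the
-- same item dicts in place identically).

-- ===== PORT A =====

-- truthiness test `item.get(k) and str(item[k]).strip()` (values are strings)
def pcdValid (item : List (String × String)) (k : String) : Bool :=
  match (PySem.Dict.mk item).get? k with
  | none => false
  | some v => (if v = "" then false else true) && (if PySem.Str.strip v = "" then false else true)

-- A's `for item in items: if …: box_value = item['box']; break`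
def pcdFindBox : List (List (String × String)) → Option String
  | [] => none
  | it :: rest =>
      if pcdValid it "box" then (PySem.Dict.mk it).get? "box" else pcdFindBox rest

-- A's grouping loop body: `country_groups[item.get('country','Unknown')].append(item)`
def pcdAGroup (g : PySem.Dict String (List (List (String × String))))
    (item : List (String × String)) : PySem.Dict String (List (List (String × String))) :=
  let country := (PySem.Dict.mk item).getD "country" "Unknown"
  match g.get? country with
  | some xs => g.insert country (xs ++ [item])
  | none => g.insert country [item]

-- A's first mutation loop body (add box where missing, count boxes_added)
def pcdAInner (bv : String)
    (p : (List (List (String × String))) × PySem.Dict String Int)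
    (it : List (String × String)) : (List (List (String × String))) × PySem.Dict String Int :=
  if !pcdValid it "box" then
    (p.1 ++ [((PySem.Dict.mk it).insert "box" bv).items],
     p.2.insert "boxes_added" (p.2.getD "boxes_added" 0 + 1))
  else (p.1 ++ [it], p.2)

-- A's per-country-group processing
def pcdAStep (acc : (List (List (String × String))) × PySem.Dict String Int)
    (ci : String × List (List (String × String))) :
    (List (List (String × String))) × PySem.Dict String Int :=
  let items0 := ci.2
  let box_value := pcdFindBox items0
  let step1 : (List (List (String × String))) × PySem.Dict String Int :=
    if items0.length > 1 then
      if items0.any (fun it => pcdValid it "image") then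
        let items_to_keep := items0.filter (fun it => pcdValid it "image")
        (items_to_keep,
         acc.2.insert "items_removed"
           (acc.2.getD "items_removed" 0 + ((items0.length : Int) - (items_to_keep.length : Int))))
      else (items0, acc.2)
    else (items0, acc.2)
  match box_value with
  | some bv =>
      let step2 := step1.1.foldl (pcdAInner bv) ([], step1.2)
      -- second loop: ensure all items have the same box value
      (acc.1 ++ step2.1.map (fun it => ((PySem.Dict.mk it).insert "box" bv).items), step2.2)
  | none => (acc.1 ++ step1.1, step1.2)

def process_coin_data (data : List (List (String × String))) : (List (List (String × String))) × (List (String × Int)) :=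
  let country_groups := data.foldl pcdAGroup PySem.Dict.empty
  let stats : PySem.Dict String Int := PySem.Dict.mk
    [("total_countries", (country_groups.size : Int)),
     ("total_items_before", (data.length : Int)),
     ("items_removed", 0),
     ("boxes_added", 0)]
  let res := country_groups.items.foldl pcdAStep ([], stats)
  (res.1, (res.2.insert "total_items_after" (res.1.length : Int)).items)

-- ===== PORT B =====

-- `item.get('country', 'Unknown')`
def pvCountry (item : List (String × String)) : String :=
  (PySem.Dict.mk item).getD "country" "Unknown"

-- B's while loop: peel off the first item's country group, process it, recurse on the rest
-- (accumulators processed, n_countries, removed, added; _valid is pcdValid)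
def pvGo : List (List (String × String)) → List (List (String × String)) → Int → Int → Int →
    (List (List (String × String))) × Int × Int × Int
  | [], processed, nc, rem, add => (processed, nc, rem, add)
  | it0 :: rest', processed, nc, rem, add =>
    let c := pvCountry it0
    let group := (it0 :: rest').filter (fun x => pvCountry x == c)
    let rest2 := (it0 :: rest').filter (fun x => !(pvCountry x == c))
    let kept := if group.length > 1 && group.any (fun x => pcdValid x "image")
                then group.filter (fun x => pcdValid x "image") else group
    let box := group.findSome? (fun x => if pcdValid x "box" then (PySem.Dict.mk x).get? "box" else none)
    match box with
    | some bv =>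
        pvGo rest2 (processed ++ kept.map (fun x => ((PySem.Dict.mk x).insert "box" bv).items))
          (nc + 1) (rem + ((group.length : Int) - (kept.length : Int)))
          (add + (((kept.filter (fun x => !pcdValid x "box")).length : Int)))
    | none =>
        pvGo rest2 (processed ++ kept) (nc + 1)
          (rem + ((group.length : Int) - (kept.length : Int))) add
termination_by l _ _ _ _ => l.length
decreasing_by
  all_goals
    simp
    exact le_trans (List.length_filter_le _ _) (by simp)

def process_coin_data_alt (data : List (List (String × String))) : (List (List (String × String))) × (List (String × Int)) :=
  let z := pvGo data [] 0 0 0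
  (z.1,
   [("total_countries", z.2.1),
    ("total_items_before", (data.length : Int)),
    ("items_removed", z.2.2.1),
    ("boxes_added", z.2.2.2),
    ("total_items_after", (z.1.length : Int))])

-- ===== PRECONDITION & SPEC =====
def Spec_process_coin_data (data : List (List (String × String))) (out : (List (List (String × String))) × (List (String × Int))) : Prop := out = process_coin_data_alt data
instance (data : List (List (String × String))) (out : (List (List (String × String))) × (List (String × Int))) : Decidable (Spec_process_coin_data data out) := by unfold Spec_process_coin_data; infer_instance

-- ===== CLAIM (what is proved, stated in full; the proofs are below) =====
def Claim_equal_process_coin_data : Prop := ∀ (data : List (List (String × String))), Dom_process_coin_data data → Spec_process_coin_data data (process_coin_data data)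

-- ===== LEMMAS AND PROOFS =====

-- the groups A's dict ends up holding, in first-occurrence order, as repeated partitions
def pcdGroups : List (List (String × String)) → List (String × List (List (String × String)))
  | [] => []
  | it :: rest =>
      (pvCountry it, it :: rest.filter (fun x => pvCountry x == pvCountry it))
        :: pcdGroups (rest.filter (fun x => !(pvCountry x == pvCountry it)))
termination_by l => l.length
decreasing_by
  simp
  exact le_trans (List.length_filter_le _ _) (by simp)

theorem pcd_findSome_eq_findBox (l : List (List (String × String))) :
    l.findSome? (fun x => if pcdValid x "box" then (PySem.Dict.mk x).get? "box" else none)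
      = pcdFindBox l := by
  induction l with
  | nil => rfl
  | cons it rest ih =>
      simp only [List.findSome?, pcdFindBox]
      by_cases h : pcdValid it "box"
      · have hs : ((PySem.Dict.mk it).get? "box").isSome = true := by
          unfold pcdValid at h
          cases hq : (PySem.Dict.mk it).get? "box" with
          | none => rw [hq] at h; exact absurd h (by simp)
          | some v => simp
        cases hq : (PySem.Dict.mk it).get? "box" with
        | none => rw [hq] at hs; exact absurd hs (by simp)
        | some v => simp [h]
      · simp [h, ih]

-- the big grouping lemma: A's fold-built dict, as an items list
theorem pcd_groups_items (data : List (List (String × String))) :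
    ∀ (d : PySem.Dict String (List (List (String × String)))), d.keys.Nodup →
      (data.foldl pcdAGroup d).items
        = d.items.map (fun p => (p.1, p.2 ++ data.filter (fun x => pvCountry x == p.1)))
          ++ pcdGroups (data.filter (fun x => !(d.contains (pvCountry x)))) := by
  induction data with
  | nil =>
      intro d _
      rw [pcdGroups.eq_def]
      simp
  | cons it rest ih =>
      intro d hnd
      simp only [List.foldl_cons]
      cases hq : d.get? (pvCountry it) with
      | some xs =>
          have hcont : d.contains (pvCountry it) = true := by
            rw [PySem.Dict.contains_eq_isSome_get?, hq]; rfl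
          have hag : pcdAGroup d it = d.insert (pvCountry it) (xs ++ [it]) := by
            unfold pcdAGroup
            dsimp only
            rw [show (PySem.Dict.mk it).getD "country" "Unknown" = pvCountry it from rfl, hq]
          rw [hag, ih _ (PySem.Dict.nodup_keys_insert _ _ _ hnd)]
          have h1 : ((d.insert (pvCountry it) (xs ++ [it])).items).map
              (fun p => (p.1, p.2 ++ rest.filter (fun x => pvCountry x == p.1)))
              = d.items.map (fun p => (p.1, p.2 ++ (it :: rest).filter (fun x => pvCountry x == p.1))) := by
            rw [PySem.Dict.items_insert_of_contains _ _ hcont, List.map_map]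
            apply List.map_congr_left
            intro p hp
            by_cases hpc : p.1 = pvCountry it
            · have hp' : (p.1, p.2) ∈ d.items := by simpa using hp
              have hpv : p.2 = xs := by
                have h5 := PySem.Dict.get?_of_mem_items _ hp' hnd
                rw [hpc, hq] at h5
                exact (Option.some.inj h5).symm
              simp [Function.comp, hpc, hpv]
            · have hb : (pvCountry it == p.1) = false := by
                simpa using Ne.symm hpc
              simp [Function.comp, hpc, hb]
          have h2 : rest.filter (fun x => !((d.insert (pvCountry it) (xs ++ [it])).contains (pvCountry x)))
              = (it :: rest).filter (fun x => !(d.contains (pvCountry x))) := by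
            rw [List.filter_cons]
            simp only [hcont, Bool.not_true, Bool.false_eq_true, if_false]
            apply List.filter_congr
            intro x hx
            rw [PySem.Dict.contains_insert]
            by_cases hxc : pvCountry x = pvCountry it
            · simp [hxc, hcont]
            · simp [hxc]
          rw [h1, h2]
      | none =>
          have hcont : d.contains (pvCountry it) = false := by
            rw [PySem.Dict.contains_eq_isSome_get?, hq]; rfl
          have hag : pcdAGroup d it = d.insert (pvCountry it) [it] := by
            unfold pcdAGroup
            dsimp only
            rw [show (PySem.Dict.mk it).getD "country" "Unknown" = pvCountry it from rfl, hq]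
          rw [hag, ih _ (PySem.Dict.nodup_keys_insert _ _ _ hnd)]
          rw [PySem.Dict.items_insert_of_not_contains _ _ hcont, List.map_append]
          have hhead : (it :: rest).filter (fun x => !(d.contains (pvCountry x)))
              = it :: rest.filter (fun x => !(d.contains (pvCountry x))) := by
            simp [hcont]
          rw [hhead]
          have ha : d.items.map
              (fun p => (p.1, p.2 ++ rest.filter (fun x => pvCountry x == p.1)))
              = d.items.map (fun p => (p.1, p.2 ++ (it :: rest).filter (fun x => pvCountry x == p.1))) := by
            apply List.map_congr_left
            intro p hp
            have hkey : p.1 ∈ d.keys := PySem.Dict.mem_keys_of_mem_items _ hp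
            have hpc : p.1 ≠ pvCountry it := by
              intro he
              rw [he] at hkey
              have : d.contains (pvCountry it) = true := by
                have := (PySem.Dict.contains_iff_mem_keys (d := d) (k := pvCountry it)).mpr hkey
                exact this
              rw [this] at hcont
              exact absurd hcont (by simp)
            have hb : (pvCountry it == p.1) = false := by simpa using Ne.symm hpc
            simp [hb]
          have hb2 : rest.filter (fun x => pvCountry x == pvCountry it)
              = (rest.filter (fun x => !(d.contains (pvCountry x)))).filter
                  (fun x => pvCountry x == pvCountry it) := by
            rw [List.filter_filter]
            apply List.filter_congr
            intro x hx
            by_cases hxc : pvCountry x = pvCountry it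
            · simp [hxc, hcont]
            · simp [hxc]
          have hc2 : rest.filter (fun x => !((d.insert (pvCountry it) [it]).contains (pvCountry x)))
              = (rest.filter (fun x => !(d.contains (pvCountry x)))).filter
                  (fun x => !(pvCountry x == pvCountry it)) := by
            rw [List.filter_filter]
            apply List.filter_congr
            intro x hx
            rw [PySem.Dict.contains_insert]
            by_cases hxc : pvCountry x = pvCountry it
            · simp [hxc]
            · simp
          have hrhs : pcdGroups (it :: rest.filter (fun x => !(d.contains (pvCountry x))))
              = (pvCountry it,
                  it :: (rest.filter (fun x => !(d.contains (pvCountry x)))).filter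
                          (fun x => pvCountry x == pvCountry it))
                :: pcdGroups ((rest.filter (fun x => !(d.contains (pvCountry x)))).filter
                          (fun x => !(pvCountry x == pvCountry it))) := by
            rw [pcdGroups.eq_def]
          rw [hrhs, ha, hc2, ← hb2]
          simp

-- A's stats dict as a literal
def pcdStats (N L r a : Int) : PySem.Dict String Int :=
  PySem.Dict.mk
    [("total_countries", N), ("total_items_before", L), ("items_removed", r), ("boxes_added", a)]

theorem pcd_stats_removed (N L r a δ : Int) :
    (pcdStats N L r a).insert "items_removed" ((pcdStats N L r a).getD "items_removed" 0 + δ)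
      = pcdStats N L (r + δ) a := rfl

theorem pcd_stats_added (N L r a δ : Int) :
    (pcdStats N L r a).insert "boxes_added" ((pcdStats N L r a).getD "boxes_added" 0 + δ)
      = pcdStats N L r (a + δ) := rfl

theorem pcd_stats_final (N L r a t : Int) :
    ((pcdStats N L r a).insert "total_items_after" t).items
      = [("total_countries", N), ("total_items_before", L), ("items_removed", r),
         ("boxes_added", a), ("total_items_after", t)] := rfl

-- A's inner mutation loop, in closed form
theorem pcd_inner (bv : String) (items : List (List (String × String)))
    (lst : List (List (String × String))) (N L r a : Int) :
    items.foldl (pcdAInner bv) (lst, pcdStats N L r a)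
      = (lst ++ items.map (fun it =>
            if !pcdValid it "box" then ((PySem.Dict.mk it).insert "box" bv).items else it),
         pcdStats N L r (a + ((items.filter (fun it => !pcdValid it "box")).length : Int))) := by
  induction items generalizing lst a with
  | nil => simp
  | cons it rest ih =>
      simp only [List.foldl_cons, List.map_cons, List.filter_cons]
      by_cases h : pcdValid it "box"
      · simp only [pcdAInner, h, Bool.not_true, Bool.false_eq_true, if_false]
        rw [ih]
        simp
      · simp only [pcdAInner, h, Bool.not_false, if_true]
        rw [pcd_stats_added, ih, Prod.mk.injEq]
        refine ⟨by simp, ?_⟩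
        have hlen : ((it :: List.filter (fun it => !pcdValid it "box") rest).length : Int)
            = 1 + ((List.filter (fun it => !pcdValid it "box") rest).length : Int) := by
          simp [List.length_cons]; ring
        simp only [hlen]
        congr 1
        ring

-- the second mutation loop makes the conditional first one irrelevant
theorem pcd_double_insert (bv : String) (items : List (List (String × String))) :
    (items.map (fun it =>
        if !pcdValid it "box" then ((PySem.Dict.mk it).insert "box" bv).items else it)).map
      (fun it => ((PySem.Dict.mk it).insert "box" bv).items)
    = items.map (fun it => ((PySem.Dict.mk it).insert "box" bv).items) := by
  rw [List.map_map]
  apply List.map_congr_left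
  intro it _
  by_cases h : pcdValid it "box"
  · simp [h]
  · simp only [h, Bool.not_false, if_true, Function.comp]
    have : PySem.Dict.mk ((PySem.Dict.mk it).insert "box" bv).items
        = (PySem.Dict.mk it).insert "box" bv := rfl
    rw [this, PySem.Dict.insert_insert_self]

-- B's kept list for a group
def pcdKept (group : List (List (String × String))) : List (List (String × String)) :=
  if group.length > 1 && group.any (fun x => pcdValid x "image")
  then group.filter (fun x => pcdValid x "image") else group

-- A's per-group step, in closed form
theorem pcd_stepEq (pd : List (List (String × String))) (N L r a : Int)
    (c : String) (group : List (List (String × String))) :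
    pcdAStep (pd, pcdStats N L r a) (c, group)
      = ((match pcdFindBox group with
          | some bv => pd ++ (pcdKept group).map (fun x => ((PySem.Dict.mk x).insert "box" bv).items)
          | none => pd ++ pcdKept group),
         pcdStats N L (r + ((group.length : Int) - ((pcdKept group).length : Int)))
           (match pcdFindBox group with
            | some _ => a + (((pcdKept group).filter (fun x => !pcdValid x "box")).length : Int)
            | none => a)) := by
  unfold pcdAStep pcdKept
  dsimp only
  by_cases h1 : group.length > 1
  · by_cases h2 : (group.any fun x => pcdValid x "image") = true
    · rw [if_pos h1, if_pos h2]
      simp only [h1, h2, decide_true, Bool.true_and, if_true]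
      rw [pcd_stats_removed]
      cases hb : pcdFindBox group with
      | some bv =>
          simp only
          rw [pcd_inner]
          simp only [List.nil_append]
          rw [pcd_double_insert]
      | none => simp
    · rw [if_pos h1, if_neg h2]
      have hk : (decide (group.length > 1) && (group.any fun x => pcdValid x "image")) = false := by
        simp [h2]
      simp only [hk, Bool.false_eq_true, if_false]
      cases hb : pcdFindBox group with
      | some bv =>
          simp only
          rw [pcd_inner]
          simp only [List.nil_append]
          rw [pcd_double_insert, sub_self, add_zero]
      | none =>
          simp only
          rw [sub_self, add_zero]
  · rw [if_neg h1]
    have hk : (decide (group.length > 1) && (group.any fun x => pcdValid x "image")) = false := by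
      simp [h1]
    simp only [hk, Bool.false_eq_true, if_false]
    cases hb : pcdFindBox group with
    | some bv =>
        simp only
        rw [pcd_inner]
        simp only [List.nil_append]
        rw [pcd_double_insert, sub_self, add_zero]
    | none =>
        simp only
        rw [sub_self, add_zero]

-- pvGo, one step unfolded into pcdKept / pcdFindBox form
theorem pvGo_cons (it0 : List (String × String)) (rest' : List (List (String × String)))
    (pd : List (List (String × String))) (nc r a : Int) :
    pvGo (it0 :: rest') pd nc r a
      = (match pcdFindBox (it0 :: rest'.filter (fun x => pvCountry x == pvCountry it0)) with
         | some bv =>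
             pvGo (rest'.filter (fun x => !(pvCountry x == pvCountry it0)))
               (pd ++ (pcdKept (it0 :: rest'.filter (fun x => pvCountry x == pvCountry it0))).map
                   (fun x => ((PySem.Dict.mk x).insert "box" bv).items))
               (nc + 1)
               (r + (((it0 :: rest'.filter (fun x => pvCountry x == pvCountry it0)).length : Int)
                     - ((pcdKept (it0 :: rest'.filter (fun x => pvCountry x == pvCountry it0))).length : Int)))
               (a + (((pcdKept (it0 :: rest'.filter (fun x => pvCountry x == pvCountry it0))).filter
                       (fun x => !pcdValid x "box")).length : Int))
         | none =>
             pvGo (rest'.filter (fun x => !(pvCountry x == pvCountry it0)))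
               (pd ++ pcdKept (it0 :: rest'.filter (fun x => pvCountry x == pvCountry it0)))
               (nc + 1)
               (r + (((it0 :: rest'.filter (fun x => pvCountry x == pvCountry it0)).length : Int)
                     - ((pcdKept (it0 :: rest'.filter (fun x => pvCountry x == pvCountry it0))).length : Int)))
               a) := by
  rw [pvGo.eq_def]
  dsimp only
  rw [pcd_findSome_eq_findBox]
  have hg : (it0 :: rest').filter (fun x => pvCountry x == pvCountry it0)
      = it0 :: rest'.filter (fun x => pvCountry x == pvCountry it0) := by
    simp
  have hr : (it0 :: rest').filter (fun x => !(pvCountry x == pvCountry it0))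
      = rest'.filter (fun x => !(pvCountry x == pvCountry it0)) := by
    simp
  rw [hg, hr]
  rfl

-- B's main loop computes A's fold over the groups
theorem pcd_loop (n : Nat) : ∀ (rest : List (List (String × String))), rest.length ≤ n →
    ∀ (pd : List (List (String × String))) (nc r a N L : Int),
    (pcdGroups rest).foldl pcdAStep (pd, pcdStats N L r a)
        = ((pvGo rest pd nc r a).1,
           pcdStats N L (pvGo rest pd nc r a).2.2.1 (pvGo rest pd nc r a).2.2.2)
      ∧ (pvGo rest pd nc r a).2.1 = nc + ((pcdGroups rest).length : Int) := by
  induction n with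
  | zero =>
      intro rest hlen pd nc r a N L
      have : rest = [] := List.eq_nil_of_length_eq_zero (Nat.le_zero.mp hlen)
      subst this
      rw [pcdGroups.eq_def]
      simp [pvGo]
  | succ n ih =>
      intro rest hlen pd nc r a N L
      cases rest with
      | nil =>
          rw [pcdGroups.eq_def]
          simp [pvGo]
      | cons it0 rest' =>
          have hgstep := pvGo_cons it0 rest' pd nc r a
          have hlen2 : (rest'.filter (fun x => !(pvCountry x == pvCountry it0))).length ≤ n :=
            le_trans (List.length_filter_le _ _) (Nat.lt_succ_iff.mp (lt_of_lt_of_le (Nat.lt_succ_self _) hlen))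
          rw [pcdGroups.eq_def]
          dsimp only
          rw [List.foldl_cons, pcd_stepEq, hgstep]
          cases hb : pcdFindBox (it0 :: rest'.filter (fun x => pvCountry x == pvCountry it0)) with
          | some bv =>
              dsimp only
              have hrec := ih (rest'.filter (fun x => !(pvCountry x == pvCountry it0))) hlen2
                (pd ++ (pcdKept (it0 :: rest'.filter (fun x => pvCountry x == pvCountry it0))).map
                    (fun x => ((PySem.Dict.mk x).insert "box" bv).items))
                (nc + 1)
                (r + (((it0 :: rest'.filter (fun x => pvCountry x == pvCountry it0)).length : Int)
                      - ((pcdKept (it0 :: rest'.filter (fun x => pvCountry x == pvCountry it0))).length : Int)))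
                (a + (((pcdKept (it0 :: rest'.filter (fun x => pvCountry x == pvCountry it0))).filter
                        (fun x => !pcdValid x "box")).length : Int)) N L
              refine ⟨hrec.1, ?_⟩
              rw [hrec.2]
              simp only [List.length_cons]
              push_cast
              ring
          | none =>
              dsimp only
              have hrec := ih (rest'.filter (fun x => !(pvCountry x == pvCountry it0))) hlen2
                (pd ++ pcdKept (it0 :: rest'.filter (fun x => pvCountry x == pvCountry it0)))
                (nc + 1)
                (r + (((it0 :: rest'.filter (fun x => pvCountry x == pvCountry it0)).length : Int)
                      - ((pcdKept (it0 :: rest'.filter (fun x => pvCountry x == pvCountry it0))).length : Int)))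
                a N L
              refine ⟨hrec.1, ?_⟩
              rw [hrec.2]
              simp only [List.length_cons]
              push_cast
              ring

-- ===== VERDICT (by name: the statement is the Claim_ definition above) =====
theorem process_coin_data_spec : Claim_equal_process_coin_data := by
  intro data _
  unfold Spec_process_coin_data process_coin_data process_coin_data_alt
  dsimp only
  have hitems : (data.foldl pcdAGroup PySem.Dict.empty).items = pcdGroups data := by
    rw [pcd_groups_items data PySem.Dict.empty PySem.Dict.nodup_keys_empty]
    simp [PySem.Dict.contains_empty]
    rfl
  have hstats : (PySem.Dict.mk
      [("total_countries", ((data.foldl pcdAGroup PySem.Dict.empty).size : Int)),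
       ("total_items_before", (data.length : Int)),
       ("items_removed", (0 : Int)), ("boxes_added", (0 : Int))])
      = pcdStats ((data.foldl pcdAGroup PySem.Dict.empty).size : Int) (data.length : Int) 0 0 := rfl
  have hloop := pcd_loop data.length data (le_refl _) [] 0 0 0
      ((data.foldl pcdAGroup PySem.Dict.empty).size : Int) (data.length : Int)
  have hsize : ((data.foldl pcdAGroup PySem.Dict.empty).size : Int) = ((pcdGroups data).length : Int) := by
    have : (data.foldl pcdAGroup PySem.Dict.empty).size = (pcdGroups data).length := by
      unfold PySem.Dict.size
      rw [hitems]
    rw [this]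
  rw [hitems, hstats, hloop.1, pcd_stats_final, hsize, hloop.2]
  norm_num
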